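-- pv_equiv track=rewrite | github.com/collinsakenga/codewars_solutions | 6 kyu/One is the loneliest number.py | loneliest
-- ===== SOURCE A (Python) =====
-- def loneliest(number):
--     temp=str(number)
--     if '1' not in temp:
--         return False
--     res=[]
--     record=[]
--     for i,num in enumerate(temp):
--         seen=int(num)
--         string=""
--         for j in range(i-1, max(-1, i-1-seen),-1):
--             string+=temp[j]
--         for j in range(i+1, min(len(temp), i+1+seen)):
--             string+=temp[j]
--         if not res:
--             res.append(string)
--             record.append(seen)
--         elif digit_sum(res[0])>digit_sum(string):
--             res=[string]
--             record=[seen]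
--         elif digit_sum(res[0])==digit_sum(string):
--             res.append(string)
--             record.append(seen)
--     return True if 1 in record else False
--
-- def digit_sum(s):
--     return sum(int(i) for i in s)
-- ===== SOURCE B (Python) =====
-- def loneliest(number):
--     digits = [int(c) for c in str(number)]
--     n = len(digits)
--     pref = [0]
--     for d in digits:
--         pref.append(pref[-1] + d)
--
--     def nsum(i):
--         d = digits[i]
--         return pref[min(n, i + 1 + d)] - pref[max(0, i - d)] - d
--
--     all_min = min(nsum(i) for i in range(n))
--     one_sums = [nsum(i) for i in range(n) if digits[i] == 1]
--     return bool(one_sums) and min(one_sums) == all_min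
-- ===== Notes on version B (the rewrite author's own statement) =====
-- stated objective: alternative
-- what changed: Replaces the per-position inner scans over neighbor characters and the running-minimum res/record bookkeeping by a prefix-sum array built once, so each neighbor sum is a constant-time difference of prefix sums, and the answer is the comparison 'minimum over positions holding 1 equals the global minimum'.
-- outside the precondition, e.g. on loneliest(-3): A returns False, B raises ValueError
import Mathlib
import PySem

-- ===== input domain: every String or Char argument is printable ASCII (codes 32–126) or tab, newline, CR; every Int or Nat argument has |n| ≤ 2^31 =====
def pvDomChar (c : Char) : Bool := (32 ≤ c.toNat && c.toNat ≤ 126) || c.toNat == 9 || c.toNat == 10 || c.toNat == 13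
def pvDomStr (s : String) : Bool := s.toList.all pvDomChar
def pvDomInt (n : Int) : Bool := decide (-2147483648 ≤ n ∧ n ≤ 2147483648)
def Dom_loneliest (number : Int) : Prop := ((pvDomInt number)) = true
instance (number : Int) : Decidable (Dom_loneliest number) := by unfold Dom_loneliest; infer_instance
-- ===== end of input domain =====

-- B replaces A's per-position inner neighbor scans and running-minimum res/record bookkeeping by a
-- prefix-sum array (each neighbor sum is a difference of prefix sums) and the staged comparison
-- "minimum over positions holding digit 1 equals the global minimum" — alternative decomposition, same cost.


-- ===== PORT A =====
-- int(c) for a single character: exact on digit characters '0'..'9' (the only ones reached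
-- inside Pre_, where str(number) consists of digits).
def dg (c : Char) : Int := (c.toNat : Int) - 48

-- port of digit_sum(s) = sum(int(i) for i in s)
def digitSumA (s : List Char) : Int := (s.map dg).sum

-- the two inner index loops of A building `string` (temp[j] via pyGetD; all indices are in range)
def buildStr (temp : List Char) (i seen : Int) : List Char :=
  let left := (PySem.List.pyRange (i - 1) (max (-1) (i - 1 - seen)) (-1)).foldl
    (fun acc j => acc ++ [PySem.List.pyGetD temp j ' ']) ([] : List Char)
  (PySem.List.pyRange (i + 1) (min (temp.length : Int) (i + 1 + seen)) 1).foldl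
    (fun acc j => acc ++ [PySem.List.pyGetD temp j ' ']) left

-- A's loop body on state (res, record)
def stepA (temp : List Char) (st : List (List Char) × List Int) (p : Int × Char) :
    List (List Char) × List Int :=
  let seen := dg p.2
  let string := buildStr temp p.1 seen
  if st.1.isEmpty then (st.1 ++ [string], st.2 ++ [seen])
  else if digitSumA st.1.head! > digitSumA string then ([string], [seen])
  else if digitSumA st.1.head! = digitSumA string then (st.1 ++ [string], st.2 ++ [seen])
  else st

def loneliest (number : Int) : Bool :=
  let temp := PySem.Int.toChars number
  if !(PySem.Chars.isIn ['1'] temp) then false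
  else
    let r := (PySem.List.enumerate temp).foldl (stepA temp) ([], [])
    r.2.contains (1 : Int)

-- ===== PORT B =====
-- digits = [int(c) for c in str(number)]
def digitsB (number : Int) : List Int := (PySem.Int.toChars number).map dg

-- pref = [0]; for d in digits: pref.append(pref[-1] + d)
def prefB (digits : List Int) : List Int :=
  digits.foldl (fun acc d => acc ++ [PySem.List.pyGetD acc (-1) 0 + d]) [0]

-- nsum(i) = pref[min(n, i+1+d)] - pref[max(0, i-d)] - d  with d = digits[i]  (all indices in range)
def nsumB (digits pref : List Int) (n i : Int) : Int :=
  PySem.List.pyGetD pref (min n (i + 1 + PySem.List.pyGetD digits i 0)) 0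
    - PySem.List.pyGetD pref (max 0 (i - PySem.List.pyGetD digits i 0)) 0
    - PySem.List.pyGetD digits i 0

def loneliest_alt (number : Int) : Bool :=
  let digits := digitsB number
  let n : Int := digits.length
  let pref := prefB digits
  let allMin := (PySem.List.min? ((PySem.List.pyRange 0 n 1).map
      (fun i => nsumB digits pref n i)) (fun x => x)).getD 0
  let oneSums := ((PySem.List.pyRange 0 n 1).filter
      (fun i => PySem.List.pyGetD digits i 0 == 1)).map (fun i => nsumB digits pref n i)
  !oneSums.isEmpty && ((PySem.List.min? oneSums (fun x => x)).getD 0 == allMin)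

-- ===== PRECONDITION & SPEC =====
-- Pre_ excludes negative numbers: on those containing the digit '1' Python A raises ValueError (int('-')),
-- and on the remaining negatives A returns False only via its early "'1' not in temp" guard while B's
-- uniform int(ch) pass raises ValueError on the '-' sign — B does the natural thing there.
def Pre_loneliest (number : Int) : Prop := 0 ≤ number
instance (number : Int) : Decidable (Pre_loneliest number) := by unfold Pre_loneliest; infer_instance
def pvWitness_loneliest : Int := (12)

def Spec_loneliest (number : Int) (out : Bool) : Prop := out = loneliest_alt number
instance (number : Int) (out : Bool) : Decidable (Spec_loneliest number out) := by unfold Spec_loneliest; infer_instance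

-- ===== CLAIM (what is proved, stated in full; the proofs are below) =====
def Claim_equal_loneliest : Prop := ∀ (number : Int), Dom_loneliest number → Pre_loneliest number → Spec_loneliest number (loneliest number)

-- ===== LEMMAS AND PROOFS =====

-- general: digit sum as a foldl
theorem sum_map_eq_foldl (l : List Char) (f : Char → Int) :
    l.foldl (fun a c => a + f c) 0 = (l.map f).sum := by
  rw [List.sum_eq_foldl, List.foldl_map]

theorem map_get_range_eq_slice {α : Type} (xs : List α) (dflt : α) :
    ∀ (n : Nat) (a b : Int), (b - a).toNat = n → 0 ≤ a → 0 ≤ b → b ≤ xs.length →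
    (PySem.List.pyRange a b 1).map (fun j => PySem.List.pyGetD xs j dflt)
      = PySem.List.slice xs (some a) (some b) := by
  intro n
  induction n with
  | zero =>
    intro a b hn ha hb0 hb
    have hba : b ≤ a := by omega
    rw [PySem.List.pyRange_one_eq_nil hba, PySem.List.slice_toNat _ ha hb0]
    have : b.toNat - a.toNat = 0 := by omega
    rw [this]
    simp
  | succ n ih =>
    intro a b hn ha hb0 hb
    have hab : a < b := by omega
    rw [PySem.List.pyRange_one_cons hab, List.map_cons,
        ih (a+1) b (by omega) (by omega) hb0 hb]
    rw [PySem.List.slice_toNat _ ha hb0, PySem.List.slice_toNat _ (by omega : (0:Int) ≤ a+1) hb0]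
    have hlt : a.toNat < xs.length := by omega
    rw [PySem.List.pyGetD_eq_getElem xs dflt ha (by omega)]
    rw [List.drop_eq_getElem_cons hlt]
    have h1 : (a+1).toNat = a.toNat + 1 := by omega
    have h2 : b.toNat - a.toNat = (b.toNat - (a.toNat+1)) + 1 := by omega
    rw [h1, h2, List.take_succ_cons]

theorem slice_min_len {α : Type} (xs : List α) (a b : Int) (hb : 0 ≤ b) :
    PySem.List.slice xs (some a) (some b)
      = PySem.List.slice xs (some a) (some (min (xs.length : Int) b)) := by
  simp only [PySem.List.slice, PySem.List.clampIdx]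
  congr 1
  split_ifs <;> omega

theorem buildStr_sum (temp : List Char) (i d : Int) (hi0 : 0 ≤ i) (hi : i < temp.length)
    (hd : -1 ≤ d) :
    digitSumA (buildStr temp i d) =
      (PySem.List.slice temp (some (max 0 (i - d))) (some i)).foldl (fun a c => a + dg c) 0
    + (PySem.List.slice temp (some (i + 1)) (some (i + 1 + d))).foldl (fun a c => a + dg c) 0 := by
  unfold buildStr
  rw [PySem.List.foldl_append_singleton_eq_map, PySem.List.foldl_append_singleton_eq_map, List.nil_append]
  unfold digitSumA
  rw [List.map_append, List.sum_append]
  congr 1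
  · -- left part
    rw [PySem.List.pyRange_neg_one_eq_reverse, List.map_reverse, List.map_reverse,
        List.sum_reverse]
    have e1 : max (-1) (i - 1 - d) + 1 = max 0 (i - d) := by omega
    have e2 : i - 1 + 1 = i := by omega
    rw [e1, e2, map_get_range_eq_slice temp ' ' _ _ _ rfl (by omega) hi0 (by omega),
        sum_map_eq_foldl]
  · -- right part
    rw [map_get_range_eq_slice temp ' ' _ _ _ rfl (by omega) (by omega)
          (by omega : min (temp.length : Int) (i + 1 + d) ≤ temp.length),
        sum_map_eq_foldl, slice_min_len temp (i+1) (i+1+d) (by omega)]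

-- abstract state for A's loop: (current minimal digit sum, record)
def stepM (st : Int × List Int) (p : Int × Int) : Int × List Int :=
  if st.1 > p.2 then (p.2, [p.1])
  else if st.1 = p.2 then (st.1, st.2 ++ [p.1])
  else st

def keyP (temp : List Char) (p : Int × Char) : Int × Int :=
  (dg p.2, digitSumA (buildStr temp p.1 (dg p.2)))

theorem head!_append {α : Type} [Inhabited α] (l : List α) (x : α) (h : l ≠ []) :
    (l ++ [x]).head! = l.head! := by
  cases l with
  | nil => exact absurd rfl h
  | cons a t => rfl

theorem simA (temp : List Char) :
    ∀ (L : List (Int × Char)) (res : List (List Char)) (record : List Int), res ≠ [] →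
    (L.foldl (stepA temp) (res, record)).1 ≠ [] ∧
    digitSumA ((L.foldl (stepA temp) (res, record)).1.head!)
      = ((L.map (keyP temp)).foldl stepM (digitSumA res.head!, record)).1 ∧
    (L.foldl (stepA temp) (res, record)).2
      = ((L.map (keyP temp)).foldl stepM (digitSumA res.head!, record)).2 := by
  intro L
  induction L with
  | nil => intro res record h; exact ⟨h, rfl, rfl⟩
  | cons p L ih =>
    intro res record h
    rw [List.foldl_cons, List.map_cons, List.foldl_cons]
    have hres : res.isEmpty = false := by simpa [List.isEmpty_iff] using h
    rw [stepA, stepM]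
    simp only [hres, Bool.false_eq_true, if_false, keyP]
    split_ifs with h1 h2
    · have := ih [buildStr temp p.1 (dg p.2)] [dg p.2] (by simp)
      simpa using this
    · have := ih (res ++ [buildStr temp p.1 (dg p.2)]) (record ++ [dg p.2]) (by simp)
      rwa [head!_append _ _ h] at this
    · exact ih res record h

theorem stepM_spec : ∀ (Q : List (Int × Int)) (m : Int) (rec : List Int),
    Q.foldl stepM (m, rec) =
      ((Q.map Prod.snd).foldl min m,
       (if (Q.map Prod.snd).foldl min m = m then rec else [])
         ++ (Q.filter (fun p => p.2 == (Q.map Prod.snd).foldl min m)).map Prod.fst) := by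
  intro Q
  induction Q with
  | nil => intro m rec; simp
  | cons q Q ih =>
    intro m rec
    have hle : (Q.map Prod.snd).foldl min (min m q.2) ≤ min m q.2 :=
      (PySem.List.foldl_min_le _ _).1
    rw [List.foldl_cons, List.map_cons, List.foldl_cons, List.filter_cons]
    rcases lt_trichotomy q.2 m with hlt | heq | hgt
    · -- q.2 < m : reset
      have hs : stepM (m, rec) q = (q.2, [q.1]) := by
        simp only [stepM]; rw [if_pos hlt]
      rw [hs, ih q.2 [q.1]]
      have e : min m q.2 = q.2 := by omega
      rw [e]
      have hne : (Q.map Prod.snd).foldl min q.2 ≠ m := by rw [e] at hle; omega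
      refine Prod.ext rfl ?_
      rw [if_neg hne, List.nil_append]
      by_cases hq : q.2 = (Q.map Prod.snd).foldl min q.2
      · rw [if_pos (by omega : (Q.map Prod.snd).foldl min q.2 = q.2),
            if_pos (by rw [beq_iff_eq]; exact hq), List.map_cons]
        rfl
      · rw [if_neg (by omega : ¬ (Q.map Prod.snd).foldl min q.2 = q.2),
            if_neg (by rw [beq_iff_eq]; exact hq)]
        rfl
    · -- q.2 = m : append
      have hs : stepM (m, rec) q = (m, rec ++ [q.1]) := by
        simp only [stepM]; rw [if_neg (by omega), if_pos (by omega)]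
      rw [hs, ih m (rec ++ [q.1])]
      have e : min m q.2 = m := by omega
      rw [e]
      refine Prod.ext rfl ?_
      by_cases hM : (Q.map Prod.snd).foldl min m = m
      · rw [if_pos hM, if_pos hM, if_pos (by rw [beq_iff_eq]; omega), List.map_cons]
        simp
      · have hq : ¬ (q.2 == (Q.map Prod.snd).foldl min m) = true := by
          rw [beq_iff_eq]; rw [e] at hle; omega
        rw [if_neg hM, if_neg hM, if_neg hq]
    · -- m < q.2 : skip
      have hs : stepM (m, rec) q = (m, rec) := by
        simp only [stepM]; rw [if_neg (by omega), if_neg (by omega)]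
      rw [hs, ih m rec]
      have e : min m q.2 = m := by omega
      rw [e]
      refine Prod.ext rfl ?_
      have hq : ¬ (q.2 == (Q.map Prod.snd).foldl min m) = true := by
        rw [beq_iff_eq]; rw [e] at hle; omega
      rw [if_neg hq]

theorem toDigitsCore_mem (fuel : Nat) : ∀ (n : Nat) (ds : List Char) (c : Char),
    c ∈ Nat.toDigitsCore 10 fuel n ds → c ∈ ds ∨ (48 ≤ c.toNat ∧ c.toNat ≤ 57) := by
  induction fuel with
  | zero => intro n ds c h; exact Or.inl h
  | succ fuel ih =>
    intro n ds c h
    have hd : 48 ≤ (Nat.digitChar (n % 10)).toNat ∧ (Nat.digitChar (n % 10)).toNat ≤ 57 := by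
      have h10 : n % 10 < 10 := by omega
      interval_cases (n % 10) <;> decide
    simp only [Nat.toDigitsCore] at h
    split at h
    · rcases List.mem_cons.mp h with h' | h'
      · subst h'; exact Or.inr hd
      · exact Or.inl h'
    · rcases ih _ _ _ h with h' | h'
      · rcases List.mem_cons.mp h' with h'' | h''
        · subst h''; exact Or.inr hd
        · exact Or.inl h''
      · exact Or.inr h'

theorem toChars_digit (n : Int) (h : 0 ≤ n) (c : Char) (hc : c ∈ PySem.Int.toChars n) :
    48 ≤ c.toNat ∧ c.toNat ≤ 57 := by
  unfold PySem.Int.toChars at hc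
  rw [if_neg (by omega)] at hc
  rcases toDigitsCore_mem _ _ _ _ hc with h' | h'
  · simp at h'
  · exact h'

theorem toDigitsCore_ne_nil : ∀ (fuel n : Nat) (ds : List Char),
    fuel ≠ 0 ∨ ds ≠ [] → Nat.toDigitsCore 10 fuel n ds ≠ [] := by
  intro fuel
  induction fuel with
  | zero =>
    intro n ds h
    rcases h with h | h
    · exact absurd rfl h
    · simpa [Nat.toDigitsCore] using h
  | succ fuel ih =>
    intro n ds h
    simp only [Nat.toDigitsCore]
    split
    · simp
    · exact ih _ _ (Or.inr (by simp))

theorem toChars_ne_nil (n : Int) (h : 0 ≤ n) : PySem.Int.toChars n ≠ [] := by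
  unfold PySem.Int.toChars
  rw [if_neg (by omega)]
  exact toDigitsCore_ne_nil _ _ _ (Or.inl (by omega))

theorem mem_enumerate_facts {α : Type} :
    ∀ (xs : List α) (s : Int) (p : Int × α), p ∈ PySem.List.enumerate xs s →
      s ≤ p.1 ∧ p.1 < s + xs.length ∧ p.2 ∈ xs := by
  intro xs
  induction xs with
  | nil => intro s p h; simp [PySem.List.enumerate_nil] at h
  | cons x t ih =>
    intro s p h
    rw [PySem.List.enumerate_cons] at h
    rcases List.mem_cons.mp h with h' | h'
    · subst h'; refine ⟨le_refl _, by simp, by simp⟩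
    · have := ih (s+1) p h'
      exact ⟨by omega, by simp [List.length_cons] at this ⊢; omega, List.mem_cons_of_mem _ this.2.2⟩

theorem final_eq (d0 s0 : Int) (Q : List (Int × Int)) (g : Bool)
    (hg : g = true ↔ (d0 = 1 ∨ ∃ p ∈ Q, p.1 = 1)) :
    (if (!g) = true then false
     else (((if (Q.map Prod.snd).foldl min s0 = s0 then [d0] else [])
         ++ (Q.filter (fun p => p.2 == (Q.map Prod.snd).foldl min s0)).map Prod.fst).contains 1))
    = ((d0, s0) :: Q).any (fun p => p.1 == 1
        && p.2 == ((PySem.List.min? (((d0, s0) :: Q).map Prod.snd) (fun x => x)).getD 0)) := by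
  rw [List.map_cons, PySem.List.min?_id_cons]
  show _ = ((d0, s0) :: Q).any fun p => p.1 == 1 && p.2 == (Q.map Prod.snd).foldl min s0
  cases g with
  | false =>
    rw [Bool.not_false, if_pos rfl]
    have hneg : ¬ (d0 = 1 ∨ ∃ p ∈ Q, p.1 = 1) := fun hc => absurd (hg.mpr hc) (by simp)
    symm
    rw [List.any_eq_false]
    intro p hp
    rcases List.mem_cons.mp hp with h' | h'
    · subst h'
      simp only [Bool.and_eq_true, beq_iff_eq, not_and]
      intro h1
      exfalso
      exact hneg (Or.inl h1)
    · simp only [Bool.and_eq_true, beq_iff_eq, not_and]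
      intro h1
      exfalso
      exact hneg (Or.inr ⟨p, h', h1⟩)
  | true =>
    simp only [Bool.not_true, Bool.false_eq_true, if_false]
    rw [Bool.eq_iff_iff, List.contains_iff_mem, List.any_eq_true]
    simp only [List.mem_append, List.mem_map, List.mem_filter, List.mem_cons,
      Bool.and_eq_true, beq_iff_eq]
    constructor
    · rintro (h1 | ⟨p, ⟨hp, hp2⟩, hp1⟩)
      · split_ifs at h1 with hM
        · rcases List.mem_singleton.mp h1 with h2
          exact ⟨(d0, s0), Or.inl rfl, by simp [← h2, hM]⟩
        · simp at h1
      · exact ⟨p, Or.inr hp, hp1.symm ▸ ⟨rfl, hp2⟩⟩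
    · rintro ⟨p, hp | hp, h1, h2⟩
      · subst hp
        simp only at h1 h2
        left
        rw [if_pos h2.symm]
        simp [h1]
      · right
        exact ⟨p, ⟨hp, h2⟩, h1⟩

theorem char_toNat_inj (a b : Char) (h : a.toNat = b.toNat) : a = b := by
  apply Char.ext
  exact UInt32.toNat_inj.mp h

-- ===== B-side lemmas: prefix sums =====
def sumsFrom (s : Int) : List Int → List Int
  | [] => []
  | d :: ds => (s + d) :: sumsFrom (s + d) ds

theorem foldl_pref : ∀ (ds acc : List Int) (s : Int), acc ≠ [] →
    PySem.List.pyGetD acc (-1) 0 = s →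
    ds.foldl (fun acc d => acc ++ [PySem.List.pyGetD acc (-1) 0 + d]) acc
      = acc ++ sumsFrom s ds := by
  intro ds
  induction ds with
  | nil => intro acc s h hl; simp [sumsFrom]
  | cons d ds ih =>
    intro acc s h hl
    rw [List.foldl_cons, hl,
        ih (acc ++ [s + d]) (s + d) (by simp) (PySem.List.pyGetD_neg_one_append_singleton _ _ _),
        List.append_assoc]
    rfl

theorem prefB_eq (ds : List Int) : prefB ds = 0 :: sumsFrom 0 ds := by
  unfold prefB
  rw [foldl_pref ds [0] 0 (by simp) (by decide)]
  rfl

theorem sumsFrom_length (s : Int) (ds : List Int) : (sumsFrom s ds).length = ds.length := by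
  induction ds generalizing s with
  | nil => rfl
  | cons d ds ih => simp [sumsFrom, ih]

theorem sumsFrom_getElem : ∀ (ds : List Int) (s : Int) (k : Nat) (h : k < ds.length),
    (sumsFrom s ds)[k]'(by rw [sumsFrom_length]; exact h) = s + (ds.take (k+1)).sum := by
  intro ds
  induction ds with
  | nil => intro s k h; simp at h
  | cons d ds ih =>
    intro s k h
    cases k with
    | zero => simp [sumsFrom]
    | succ k =>
      have := ih (s + d) k (by simpa using h)
      simp only [sumsFrom, List.getElem_cons_succ, List.take_succ_cons, List.sum_cons]
      rw [this]
      ring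

theorem pref_getElem (ds : List Int) (m : Nat) (hm : m ≤ ds.length) :
    ((0 : Int) :: sumsFrom 0 ds)[m]'(by simp [sumsFrom_length]; omega) = (ds.take m).sum := by
  cases m with
  | zero => simp
  | succ m =>
    have hm' : m < ds.length := by omega
    rw [List.getElem_cons_succ, sumsFrom_getElem ds 0 m hm']
    ring

theorem pref_getD (ds : List Int) (k : Int) (h0 : 0 ≤ k) (hk : k.toNat ≤ ds.length) :
    PySem.List.pyGetD (prefB ds) k 0 = (ds.take k.toNat).sum := by
  rw [prefB_eq]
  have hlen : ((0 : Int) :: sumsFrom 0 ds).length = ds.length + 1 := by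
    simp [sumsFrom_length]
  rw [PySem.List.pyGetD_eq_getElem _ _ h0 (by omega)]
  exact pref_getElem ds k.toNat hk

-- sum over a python slice of an Int list as a difference of take-sums
theorem sum_slice_eq (xs : List Int) (a b : Int) (h0 : 0 ≤ a) (hab : a ≤ b) :
    (PySem.List.slice xs (some a) (some b)).sum
      = (xs.take (min xs.length b.toNat)).sum - (xs.take a.toNat).sum := by
  rw [PySem.List.slice_toNat _ h0 (by omega)]
  have hsplit : xs.take (a.toNat + (b.toNat - a.toNat))
      = xs.take a.toNat ++ (xs.drop a.toNat).take (b.toNat - a.toNat) :=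
    List.take_add ..
  have he : a.toNat + (b.toNat - a.toNat) = b.toNat := by omega
  rw [he] at hsplit
  have hb : (xs.take (min xs.length b.toNat)).sum = (xs.take b.toNat).sum := by
    rcases le_or_gt b.toNat xs.length with h | h
    · rw [min_eq_right h]
    · rw [min_eq_left (by omega), List.take_of_length_le (le_refl _),
          List.take_of_length_le (by omega)]
  rw [hb, hsplit, List.sum_append]
  ring

theorem slice_map {α β : Type} (f : α → β) (xs : List α) (a b : Option Int) :
    PySem.List.slice (xs.map f) a b = (PySem.List.slice xs a b).map f := by
  simp only [PySem.List.slice, List.length_map, List.map_drop, List.map_take]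

theorem take_sum_succ (xs : List Int) (k : Nat) (h : k < xs.length) :
    (xs.take (k+1)).sum = (xs.take k).sum + xs[k] := by
  rw [List.take_add_one, List.sum_append, List.getElem?_eq_getElem h]
  simp

-- pointwise bridge: B's (digit, nsum) pair at index j equals A's keyP pair
theorem pair_pointwise (temp : List Char) (j : Int) (h0 : 0 ≤ j) (hj : j < temp.length)
    (hdig : ∀ c ∈ temp, 48 ≤ c.toNat ∧ c.toNat ≤ 57) :
    (PySem.List.pyGetD (temp.map dg) j 0,
      nsumB (temp.map dg) (prefB (temp.map dg)) (temp.length : Int) j)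
    = keyP temp (j, PySem.List.pyGetD temp j ' ') := by
  have hjn : j.toNat < temp.length := by omega
  have hch : PySem.List.pyGetD temp j ' ' = temp[j.toNat] :=
    PySem.List.pyGetD_eq_getElem temp ' ' h0 (by omega)
  have hd : PySem.List.pyGetD (temp.map dg) j 0 = dg temp[j.toNat] := by
    rw [PySem.List.pyGetD_eq_getElem (temp.map dg) 0 h0 (by simp; omega)]
    simp
  have hdbound : 0 ≤ dg temp[j.toNat] ∧ dg temp[j.toNat] ≤ 9 := by
    have := hdig temp[j.toNat] (List.getElem_mem hjn)
    unfold dg; omega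
  set d := dg temp[j.toNat] with hdd
  set xs := temp.map dg with hxs
  have hxlen : xs.length = temp.length := by simp [hxs]
  unfold keyP
  refine Prod.ext (by rw [hd, hch]) ?_
  show nsumB xs (prefB xs) (temp.length : Int) j = digitSumA (buildStr temp j (dg (PySem.List.pyGetD temp j ' ')))
  rw [hch, ← hdd]
  rw [buildStr_sum temp j d h0 (by exact_mod_cast hj) (by omega)]
  rw [sum_map_eq_foldl, sum_map_eq_foldl, ← slice_map, ← slice_map, ← hxs]
  unfold nsumB
  rw [hd]
  -- left slice: [max 0 (j-d), j)
  rw [sum_slice_eq xs (max 0 (j - d)) j (by omega) (by omega)]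
  -- right slice: [j+1, j+1+d)
  rw [sum_slice_eq xs (j + 1) (j + 1 + d) (by omega) (by omega)]
  -- prefix lookups
  rw [pref_getD xs (min (temp.length : Int) (j + 1 + d)) (by omega) (by omega),
      pref_getD xs (max 0 (j - d)) (by omega) (by omega)]
  have hmin1 : min xs.length j.toNat = j.toNat := by omega
  have hmin2 : min xs.length (j + 1 + d).toNat = (min (temp.length : Int) (j + 1 + d)).toNat := by
    omega
  rw [hmin1, hmin2]
  have hstep : (xs.take (j.toNat + 1)).sum = (xs.take j.toNat).sum + d := by
    rw [take_sum_succ xs j.toNat (by omega)]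
    have hx : xs[j.toNat]'(by omega) = d := by
      simp only [hxs, List.getElem_map]
      exact hdd.symm
    rw [hx]
  have he1 : (j + 1).toNat = j.toNat + 1 := by omega
  rw [he1, hstep]
  ring

-- B's staged form equals the any-form, given M is a lower bound of all sums
theorem bform_eq_anyform (P : List (Int × Int)) (M : Int)
    (hle : ∀ p ∈ P, M ≤ p.2) :
    (!(((P.filter (fun p => p.1 == 1)).map Prod.snd).isEmpty) &&
      ((PySem.List.min? ((P.filter (fun p => p.1 == 1)).map Prod.snd) (fun x => x)).getD 0 == M))
    = P.any (fun p => p.1 == 1 && p.2 == M) := by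
  rcases he : (P.filter (fun p => p.1 == 1)).map Prod.snd with _ | ⟨o, os⟩
  · -- no position holds digit 1
    have hnone : ∀ p ∈ P, ¬ (p.1 == 1) = true := by
      intro p hp hc
      have : p ∈ P.filter (fun p => p.1 == 1) := List.mem_filter.mpr ⟨hp, hc⟩
      simp [List.map_eq_nil_iff.mp he] at this
    rw [he]
    simp only [List.isEmpty_nil, Bool.not_true, Bool.false_and]
    symm
    rw [List.any_eq_false]
    intro p hp
    simp only [Bool.and_eq_true, not_and]
    intro h1
    exact absurd h1 (hnone p hp)
  · rw [he, PySem.List.min?_id_cons]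
    simp only [List.isEmpty_cons, Bool.not_false, Bool.true_and, Option.getD_some]
    have hmem : os.foldl min o ∈ o :: os := by
      rcases PySem.List.foldl_min_mem os o with h | h
      · rw [h]; exact List.mem_cons_self
      · exact List.mem_cons_of_mem _ h
    have hMle : ∀ y ∈ o :: os, M ≤ y := by
      intro y hy
      rw [← he] at hy
      obtain ⟨p, hp, hps⟩ := List.mem_map.mp hy
      exact hps ▸ hle p (List.mem_filter.mp hp).1
    have hminle : ∀ y ∈ o :: os, os.foldl min o ≤ y := by
      intro y hy
      rcases List.mem_cons.mp hy with h | h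
      · rw [h]; exact (PySem.List.foldl_min_le os o).1
      · exact (PySem.List.foldl_min_le os o).2 y h
    rw [Bool.eq_iff_iff, beq_iff_eq, List.any_eq_true]
    constructor
    · intro hmin
      have : M ∈ o :: os := hmin ▸ hmem
      rw [← he] at this
      obtain ⟨p, hp, hps⟩ := List.mem_map.mp this
      obtain ⟨hpP, hp1⟩ := List.mem_filter.mp hp
      exact ⟨p, hpP, by simp [hp1, hps]⟩
    · rintro ⟨p, hp, hcond⟩
      simp only [Bool.and_eq_true, beq_iff_eq] at hcond
      have hpm : p.2 ∈ o :: os := by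
        rw [← he]
        exact List.mem_map_of_mem (List.mem_filter.mpr ⟨hp, by simp [hcond.1]⟩)
      have h1 : os.foldl min o ≤ p.2 := hminle _ hpm
      have h2 : M ≤ os.foldl min o := hMle _ hmem
      omega

theorem min?_getD_le (l : List Int) (y : Int) (hy : y ∈ l) :
    (PySem.List.min? l (fun x => x)).getD 0 ≤ y := by
  cases l with
  | nil => simp at hy
  | cons o os =>
    rw [PySem.List.min?_id_cons, Option.getD_some]
    rcases List.mem_cons.mp hy with h | h
    · exact h ▸ (PySem.List.foldl_min_le os o).1
    · exact (PySem.List.foldl_min_le os o).2 y h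

theorem main_equiv (number : Int) (h : 0 ≤ number) :
    loneliest number = loneliest_alt number := by
  have hdig := toChars_digit number h
  have hne := toChars_ne_nil number h
  simp only [loneliest, loneliest_alt, digitsB]
  set temp := PySem.Int.toChars number with htemp
  -- B's index-indexed pair list equals A's keyP-mapped enumerate
  have hlist : (PySem.List.pyRange 0 ((temp.map dg).length : Int) 1).map
        (fun i => (PySem.List.pyGetD (temp.map dg) i 0,
          nsumB (temp.map dg) (prefB (temp.map dg)) ((temp.map dg).length : Int) i))
      = (PySem.List.enumerate temp).map (keyP temp) := by
    rw [PySem.List.enumerate_eq_map_pyRange temp ' ', List.map_map]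
    simp only [PySem.List.len, List.length_map]
    apply List.map_congr_left
    intro j hj
    have hjr := PySem.List.mem_pyRange_one.mp hj
    exact pair_pointwise temp j (by omega) (by omega) hdig
  have hsnd : ((PySem.List.enumerate temp).map (keyP temp)).map Prod.snd
      = (PySem.List.pyRange 0 ((temp.map dg).length : Int) 1).map
          (fun i => nsumB (temp.map dg) (prefB (temp.map dg)) ((temp.map dg).length : Int) i) := by
    rw [← hlist, List.map_map]
    rfl
  have hones : (((PySem.List.enumerate temp).map (keyP temp)).filter
        (fun p => p.1 == 1)).map Prod.snd
      = ((PySem.List.pyRange 0 ((temp.map dg).length : Int) 1).filter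
          (fun i => PySem.List.pyGetD (temp.map dg) i 0 == 1)).map
          (fun i => nsumB (temp.map dg) (prefB (temp.map dg)) ((temp.map dg).length : Int) i) := by
    rw [← hlist, List.filter_map, List.map_map]
    rfl
  rw [← hones, ← hsnd]
  obtain ⟨c, cs, e⟩ := List.exists_cons_of_ne_nil hne
  rw [e]
  apply Eq.trans
    (b := ((dg c, digitSumA (buildStr (c :: cs) 0 (dg c)))
        :: (PySem.List.enumerate cs 1).map (keyP (c :: cs))).any
      (fun p => p.1 == 1 && p.2 ==
        (PySem.List.min? (((dg c, digitSumA (buildStr (c :: cs) 0 (dg c)))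
            :: (PySem.List.enumerate cs 1).map (keyP (c :: cs))).map Prod.snd)
          (fun x => x)).getD 0))
  · -- A-side: collapse the fold to the abstract minimum state, then final_eq
    rw [PySem.List.enumerate_cons, List.foldl_cons]
    simp only [show (0:Int)+1 = 1 from by norm_num]
    have hstep0 : stepA (c :: cs) (([] : List (List Char)), ([] : List Int)) (0, c)
        = ([buildStr (c :: cs) 0 (dg c)], [dg c]) := by
      simp [stepA]
    rw [hstep0]
    obtain ⟨hA1, hA2, hA3⟩ := simA (c :: cs) (PySem.List.enumerate cs 1)
        [buildStr (c :: cs) 0 (dg c)] [dg c] (by simp)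
    rw [hA3, stepM_spec]
    have h49 : ('1').toNat = 49 := by decide
    have hg : PySem.Chars.isIn ['1'] (c :: cs) = true ↔
        (dg c = 1 ∨ ∃ p ∈ List.map (keyP (c :: cs)) (PySem.List.enumerate cs 1), p.1 = 1) := by
      rw [PySem.Chars.isIn_iff_infix]
      constructor
      · intro hin
        have h1 : '1' ∈ c :: cs := hin.mem (by simp)
        rcases List.mem_cons.mp h1 with h' | h'
        · left
          unfold dg
          rw [← h', h49]
          norm_num
        · right
          rw [← PySem.List.map_snd_enumerate cs 1] at h'
          obtain ⟨p, hp, hp2⟩ := List.mem_map.mp h'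
          refine ⟨keyP (c :: cs) p, List.mem_map_of_mem hp, ?_⟩
          show dg p.2 = 1
          unfold dg
          rw [hp2, h49]
          norm_num
      · intro hOr
        apply (List.singleton_infix_iff _ _).mpr
        rcases hOr with h1 | ⟨p, hp, hp1⟩
        · have hc : c = '1' := by
            apply char_toNat_inj
            unfold dg at h1
            omega
          rw [hc]
          exact List.mem_cons_self
        · obtain ⟨q, hq, hq2⟩ := List.mem_map.mp hp
          have hq1 : dg q.2 = 1 := by
            rw [show dg q.2 = (keyP (c :: cs) q).1 from rfl, hq2]; exact hp1
          have hqc : q.2 = '1' := by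
            apply char_toNat_inj
            unfold dg at hq1
            omega
          have := (mem_enumerate_facts cs 1 q hq).2.2
          rw [hqc] at this
          exact List.mem_cons_of_mem _ this
    exact final_eq (dg c) (digitSumA [buildStr (c :: cs) 0 (dg c)].head!)
      (List.map (keyP (c :: cs)) (PySem.List.enumerate cs 1))
      (PySem.Chars.isIn ['1'] (c :: cs)) hg
  · -- B-side: the staged-minimum form equals the any-form
    have hle : ∀ p ∈ (PySem.List.enumerate (c :: cs)).map (keyP (c :: cs)),
        (PySem.List.min? (((PySem.List.enumerate (c :: cs)).map (keyP (c :: cs))).map Prod.snd)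
          (fun x => x)).getD 0 ≤ p.2 :=
      fun p hp => min?_getD_le _ p.2 (List.mem_map_of_mem hp)
    exact (bform_eq_anyform ((PySem.List.enumerate (c :: cs)).map (keyP (c :: cs))) _ hle).symm

-- ===== VERDICT (by name: the statement is the Claim_ definition above) =====
theorem loneliest_spec : Claim_equal_loneliest := by
  intro number _ hpre
  unfold Spec_loneliest
  exact main_equiv number hpre
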